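-- pv_equiv track=rewrite | github.com/jonathantsang/CompetitiveProgramming | codeforces/c634/e/e.py | solve
-- ===== SOURCE A (Python) =====
-- def check(arr, bitmask):
-- 	chosen = []
-- 	seen = set()
-- 	for i in range(0, len(arr)):
-- 		if bitmask & (1 << i):
-- 			seen.add(arr[i])
-- 			if len(seen) > 2:
-- 				return 0 # not a three block palindrome
-- 			chosen.append(arr[i])
-- 	seen = set()
-- 	changes = 0
-- 	secondchar = None
-- 	x = 0
-- 	y = 0
-- 	i = 0
-- 	while i < len(chosen) and chosen[i] == chosen[0]:
-- 		x += 1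
-- 		i += 1
-- 	if i == len(chosen):
-- 		return len(chosen)
--
-- 	secondchar = chosen[i]
-- 	while i < len(chosen) and chosen[i] == secondchar:
-- 		y += 1
-- 		i += 1
-- 	if i == len(chosen):
-- 		return 0 # not a three block palidrome
--
-- 	if len(chosen) != i + x:
-- 		return 0 # not a three block palindrome
--
-- 	for j in range(i, len(chosen)):
-- 		if chosen[j] != chosen[0]:
-- 			return 0 # not a three block palindrome
--
-- 	return len(chosen)
--
-- def solve(a):
-- 	best = 0
-- 	bitset = 1 << len(a)
-- 	for i in range(bitset, -1, -1):
-- 		digits = i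
-- 		if best > len(bin(digits)[2:]):
-- 			continue
-- 		best = max(best, check(a, digits))
-- 	return best
-- ===== SOURCE B (Python) =====
-- def solve(a):
--     # distinct values in first-occurrence order
--     vals = []
--     for v in a:
--         if v not in vals:
--             vals.append(v)
--     best = 0
--     for v in vals:
--         p = [i for i, u in enumerate(a) if u == v]
--         if len(p) > best:
--             best = len(p)
--         for x in range(1, len(p) // 2 + 1):
--             l = p[x - 1]
--             r = p[len(p) - x]
--             inner = 0
--             for w in vals:
--                 cnt = 0
--                 for j, u in enumerate(a):
--                     if u == w and l < j < r:
--                         cnt += 1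
--                 if cnt > inner:
--                     inner = cnt
--             cand = 2 * x + inner
--             if cand > best:
--                 best = cand
--     return best
-- ===== Notes on version B (the rewrite author's own statement) =====
-- stated objective: faster
-- what changed: Replaced the exhaustive enumeration of all 2^n bitmask subsequences with a direct search over candidates (outer value v, number x of outer copies taken from v's first/last occurrences, best middle value counted strictly between them), which is polynomial instead of exponential.
import Mathlib
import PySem

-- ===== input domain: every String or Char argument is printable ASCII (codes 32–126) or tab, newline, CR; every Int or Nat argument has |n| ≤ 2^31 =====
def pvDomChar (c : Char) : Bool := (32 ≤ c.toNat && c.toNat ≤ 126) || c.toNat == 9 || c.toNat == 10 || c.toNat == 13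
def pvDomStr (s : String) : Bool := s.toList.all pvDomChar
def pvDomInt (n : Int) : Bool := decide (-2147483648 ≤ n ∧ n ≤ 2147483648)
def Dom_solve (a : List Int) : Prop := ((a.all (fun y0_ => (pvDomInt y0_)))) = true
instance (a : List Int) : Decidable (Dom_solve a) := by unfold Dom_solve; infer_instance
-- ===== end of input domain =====

-- B replaces A's exhaustive 2^n bitmask enumeration by a polynomial direct search over
-- candidate (outer value, outer block size, best middle value) triples; objective: faster.

-- ===== PORT A =====

-- the two 'while' scans of check: length of the longest prefix equal to c
def runLen : List Int → Int → Nat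
  | [], _ => 0
  | h :: t, c => if h = c then runLen t c + 1 else 0

-- check's code after the selection loop, on the built 'chosen' list
def checkTail (chosen : List Int) : Int :=
  let c0 := chosen.getD 0 0            -- chosen[0]; only read when chosen ≠ [] (short-circuit)
  let x := runLen chosen c0
  if x = chosen.length then (chosen.length : Int)
  else
    let rest := chosen.drop x
    let d := rest.getD 0 0             -- secondchar = chosen[i], i = x < len so in range
    let y := runLen rest d
    if x + y = chosen.length then 0
    else if chosen.length ≠ x + y + x then 0
    else if (rest.drop y).all (fun v => v == c0) then (chosen.length : Int) else 0

-- check's first loop: build 'chosen', early-return (none) when a third distinct value appears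
def checkSel : List Int → Int → Nat → PySem.Set Int → List Int → Option (List Int)
  | [], _, _, _, chosen => some chosen
  | v :: t, bitmask, i, seen, chosen =>
    if PySem.Int.band bitmask ((1 : Int) <<< i) ≠ 0 then
      let seen' := PySem.Set.add seen v
      if 2 < seen'.length then none
      else checkSel t bitmask (i + 1) seen' (chosen ++ [v])
    else checkSel t bitmask (i + 1) seen chosen

def check (arr : List Int) (bitmask : Int) : Int :=
  match checkSel arr bitmask 0 PySem.Set.empty [] with
  | none => 0
  | some chosen => checkTail chosen

-- len(bin(d)[2:])
def binSliceLen (d : Int) : Int :=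
  PySem.Str.len (PySem.Str.slice (PySem.Int.pyBin d) (some 2) none)

def solve (a : List Int) : Int :=
  let bitset : Int := (1 : Int) <<< a.length
  (PySem.List.pyRange bitset (-1) (-1)).foldl
    (fun best i => if best > binSliceLen i then best else max best (check a i)) 0

-- ===== PORT B =====

-- [i for i, u in enumerate(a) if u == v]
def posOf (a : List Int) (v : Int) : List Int :=
  (PySem.List.enumerate a).foldl (fun q iu => if iu.2 = v then q ++ [iu.1] else q) []

-- the innermost counting loop of Source B
def cntBetween (a : List Int) (w l r : Int) : Int :=
  (PySem.List.enumerate a).foldl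
    (fun c iu => if iu.2 = w ∧ l < iu.1 ∧ iu.1 < r then c + 1 else c) 0

-- the 'for w in vals' loop of Source B
def bestInner (vals : List Int) (a : List Int) (l r : Int) : Int :=
  vals.foldl (fun inner w =>
    let cnt := cntBetween a w l r
    if cnt > inner then cnt else inner) 0

def solve_alt (a : List Int) : Int :=
  let vals := a.foldl (fun vs v => if v ∈ vs then vs else vs ++ [v]) []
  vals.foldl (fun best v =>
    let p := posOf a v
    let best := if (p.length : Int) > best then (p.length : Int) else best
    (PySem.List.pyRange 1 (PySem.Int.floordiv (p.length : Int) 2 + 1) 1).foldl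
      (fun best x =>
        let l := PySem.List.pyGetD p (x - 1) 0
        let r := PySem.List.pyGetD p ((p.length : Int) - x) 0
        let inner := bestInner vals a l r
        let cand := 2 * x + inner
        if cand > best then cand else best) best) 0

-- ===== PRECONDITION & SPEC =====
def Spec_solve (a : List Int) (out : Int) : Prop := out = solve_alt a
instance (a : List Int) (out : Int) : Decidable (Spec_solve a out) := by unfold Spec_solve; infer_instance

-- ===== CLAIM (what is proved, stated in full; the proofs are below) =====
def Claim_equal_solve : Prop := ∀ (a : List Int), Dom_solve a → Spec_solve a (solve a)

-- ===== LEMMAS AND PROOFS =====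

-- ---------- generic fold lemmas ----------

theorem foldl_prune_eq (f g : Int → Int) (l : List Int) (b : Int)
    (h : ∀ i ∈ l, f i ≤ g i) :
    l.foldl (fun b i => if b > g i then b else max b (f i)) b
      = l.foldl (fun b i => max b (f i)) b := by
  induction l generalizing b with
  | nil => rfl
  | cons i t ih =>
    simp only [List.foldl_cons]
    by_cases hb : b > g i
    · rw [if_pos hb, max_eq_left (le_trans (h i (by simp)) (le_of_lt hb))]
      exact ih b (fun j hj => h j (List.mem_cons_of_mem _ hj))
    · rw [if_neg hb]
      exact ih _ (fun j hj => h j (List.mem_cons_of_mem _ hj))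

theorem foldl_ge_init {α : Type} (step : Int → α → Int)
    (h : ∀ b v, b ≤ step b v) : ∀ (l : List α) (b : Int), b ≤ l.foldl step b := by
  intro l
  induction l with
  | nil => intro b; simp
  | cons v t ih => intro b; exact le_trans (h b v) (ih (step b v))

theorem foldl_le_of_step {α : Type} (step : Int → α → Int) (S : Int) :
    ∀ (l : List α) (b : Int), (∀ b v, v ∈ l → b ≤ S → step b v ≤ S) → b ≤ S →
      l.foldl step b ≤ S := by
  intro l
  induction l with
  | nil => intro b _ hb; simpa using hb
  | cons v t ih =>
    intro b h hb
    exact ih (step b v) (fun c w hw hc => h c w (List.mem_cons_of_mem _ hw) hc)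
      (h b v (List.mem_cons_self) hb)

theorem foldl_reaches {α : Type} (step : Int → α → Int) (v : α) (X : Int)
    (hup : ∀ c w, c ≤ step c w) (hX : ∀ c, X ≤ step c v) :
    ∀ (l : List α) (b : Int), v ∈ l → X ≤ l.foldl step b := by
  intro l
  induction l with
  | nil => intro b hb; simp at hb
  | cons w t ih =>
    intro b hb
    rcases List.mem_cons.mp hb with h | h
    · subst h
      exact le_trans (hX b) (foldl_ge_init step hup t (step b v))
    · exact ih (step b w) h

theorem foldl_max_eq_or_mem {α : Type} (f : α → Int) :
    ∀ (l : List α) (b : Int),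
      l.foldl (fun c y => max c (f y)) b = b ∨
      ∃ y ∈ l, l.foldl (fun c y => max c (f y)) b = f y := by
  intro l
  induction l with
  | nil => intro b; left; rfl
  | cons y t ih =>
    intro b
    rcases ih (max b (f y)) with h | ⟨z, hz, h⟩
    · simp only [List.foldl_cons] at *
      rcases le_total (f y) b with hle | hle
      · left; rw [h, max_eq_left hle]
      · right; exact ⟨y, List.mem_cons_self, by rw [h, max_eq_right hle]⟩
    · right; exact ⟨z, List.mem_cons_of_mem _ hz, h⟩

theorem le_foldl_maxf {α : Type} (f : α → Int) (l : List α) (b : Int) :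
    b ≤ l.foldl (fun c y => max c (f y)) b ∧
    ∀ y ∈ l, f y ≤ l.foldl (fun c y => max c (f y)) b := by
  have h := PySem.List.le_foldl_max (l.map f) b
  rw [List.foldl_map] at h
  exact ⟨h.1, fun y hy => h.2 (f y) (List.mem_map_of_mem hy)⟩

-- ---------- binary-length of the pruning test ----------

def binDigits (n : Nat) : Nat :=
  if n < 2 then 1 else binDigits (n / 2) + 1
decreasing_by omega

theorem toDigitsCore_len : ∀ (f n : Nat) (l : List Char), n < f →
    (Nat.toDigitsCore 2 f n l).length = binDigits n + l.length := by
  intro f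
  induction f with
  | zero => intro n l h; omega
  | succ f ih =>
    intro n l h
    rw [Nat.toDigitsCore]
    by_cases h2 : n / 2 = 0
    · rw [if_pos h2, binDigits]
      rw [if_pos (by omega)]
      simp
      omega
    · have hn2 : 2 ≤ n := by omega
      have hbd : binDigits n = binDigits (n / 2) + 1 := by
        rw [binDigits]; rw [if_neg (by omega)]
      rw [if_neg h2, ih (n / 2) _ (by omega), hbd]
      simp
      omega

theorem binSliceLen_eq (m : Int) (hm : 0 ≤ m) :
    binSliceLen m = (binDigits m.toNat : Int) := by
  have h1 : binSliceLen m = ((Nat.toDigits 2 m.toNat).length : Int) := by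
    simp only [binSliceLen]
    simp [PySem.Str.len, PySem.Str.slice, PySem.Int.pyBin, PySem.Int.toBinChars0b,
      not_lt.mpr hm]
    rw [PySem.List.slice_from _ (by norm_num)]
    simp
  rw [h1, Nat.toDigits, toDigitsCore_len _ _ _ (Nat.lt_succ_self _)]
  simp

-- ---------- selS : the subsequence selected by a bitmask ----------

def selS : List Int → Nat → List Int
  | [], _ => []
  | v :: t, m => if m % 2 = 1 then v :: selS t (m / 2) else selS t (m / 2)

theorem selS_zero : ∀ l : List Int, selS l 0 = [] := by
  intro l
  induction l with
  | nil => rfl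
  | cons v t ih => simp [selS, ih]

theorem selS_sublist : ∀ (l : List Int) (m : Nat), (selS l m).Sublist l := by
  intro l
  induction l with
  | nil => intro m; simp [selS]
  | cons v t ih =>
    intro m
    rw [selS]
    split
    · exact List.Sublist.cons₂ v (ih (m / 2))
    · exact List.Sublist.cons v (ih (m / 2))

theorem selS_length_le : ∀ (l : List Int) (m : Nat), (selS l m).length ≤ binDigits m := by
  intro l
  induction l with
  | nil => intro m; simp [selS]
  | cons v t ih =>
    intro m
    rw [selS]
    by_cases hm2 : m < 2
    · rw [binDigits, if_pos hm2]
      interval_cases m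
      · simp [selS_zero]
      · simp [selS_zero]
    · rw [binDigits, if_neg hm2]
      split
      · simpa using Nat.add_le_add_right (ih (m / 2)) 1
      · exact le_trans (ih (m / 2)) (Nat.le_succ _)

theorem mask_exists : ∀ (s a : List Int), s.Sublist a →
    ∃ m : Nat, m < 2 ^ a.length ∧ selS a m = s := by
  intro s a hs
  induction hs with
  | slnil => exact ⟨0, by simp, rfl⟩
  | cons v h ih =>
    obtain ⟨m, hm, hsel⟩ := ih
    refine ⟨2 * m, by simp [pow_succ]; omega, ?_⟩
    rw [selS]
    rw [if_neg (by omega)]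
    rw [Nat.mul_div_cancel_left m (by norm_num)]
    exact hsel
  | cons₂ v h ih =>
    obtain ⟨m, hm, hsel⟩ := ih
    refine ⟨2 * m + 1, by simp [pow_succ]; omega, ?_⟩
    rw [selS]
    rw [if_pos (by omega)]
    have : (2 * m + 1) / 2 = m := by omega
    rw [this, hsel]

-- ---------- checkSel characterization ----------

theorem len_le_update (xs : List Int) (s : PySem.Set Int) :
    s.length ≤ (PySem.Set.update s xs).length := by
  induction xs generalizing s with
  | nil => simp [PySem.Set.update]
  | cons x t ih =>
    rw [PySem.Set.update_cons]
    refine le_trans ?_ (ih (s.add x))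
    rw [PySem.Set.add_eq_ite]
    split
    · exact le_refl _
    · simp

theorem bitTest (m : Int) (i : Nat) (hm : 0 ≤ m) :
    (PySem.Int.band m ((1 : Int) <<< i) ≠ 0) ↔ (m.toNat / 2 ^ i) % 2 = 1 := by
  rw [Int.shiftLeft_eq, one_mul]
  have h2 : ((2 : Int) ^ i) = (((2 ^ i : Nat)) : Int) := by push_cast; ring
  rw [h2, PySem.Int.band_of_nonneg hm (by positivity), Int.toNat_natCast,
    Nat.and_two_pow]
  have ht : m.toNat.testBit i = decide ((m.toNat / 2 ^ i) % 2 = 1) := by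
    rw [Nat.testBit, Nat.and_comm, Nat.and_one_is_mod, Nat.shiftRight_eq_div_pow]
    rcases Nat.mod_two_eq_zero_or_one (m.toNat / 2 ^ i) with h | h <;> simp [h]
  rw [ht]
  rcases Nat.mod_two_eq_zero_or_one (m.toNat / 2 ^ i) with h | h <;>
    simp [h, (pow_pos (by norm_num : (0:Nat) < 2) i).ne']

theorem checkSel_eq : ∀ (l : List Int) (m : Int) (i : Nat) (seen : PySem.Set Int)
    (chosen : List Int), 0 ≤ m → seen.length ≤ 2 →
    checkSel l m i seen chosen =
      if (PySem.Set.update seen (selS l (m.toNat / 2 ^ i))).length ≤ 2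
      then some (chosen ++ selS l (m.toNat / 2 ^ i)) else none := by
  intro l
  induction l with
  | nil =>
    intro m i seen chosen _ hs
    rw [checkSel, selS]
    rw [if_pos (by simpa [PySem.Set.update] using hs)]
    simp
  | cons v t ih =>
    intro m i seen chosen hm hs
    have hdiv : m.toNat / 2 ^ (i + 1) = (m.toNat / 2 ^ i) / 2 := by
      rw [pow_succ, Nat.div_div_eq_div_mul]
    rw [checkSel]
    by_cases hb : PySem.Int.band m ((1 : Int) <<< i) ≠ 0
    · rw [if_pos hb]
      have hbit : (m.toNat / 2 ^ i) % 2 = 1 := (bitTest m i hm).mp hb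
      have hsel : selS (v :: t) (m.toNat / 2 ^ i) = v :: selS t (m.toNat / 2 ^ (i + 1)) := by
        rw [selS, if_pos hbit, hdiv]
      rw [hsel]
      by_cases h2 : 2 < (PySem.Set.add seen v).length
      · rw [if_pos h2]
        have hle := len_le_update (selS t (m.toNat / 2 ^ (i + 1))) (PySem.Set.add seen v)
        rw [PySem.Set.update_cons]
        rw [if_neg (by omega)]
      · rw [if_neg h2]
        rw [ih m (i + 1) (PySem.Set.add seen v) (chosen ++ [v]) hm (by omega)]
        rw [PySem.Set.update_cons]
        simp [List.append_assoc]
    · rw [if_neg hb]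
      have hbit : (m.toNat / 2 ^ i) % 2 ≠ 1 := fun hh => hb ((bitTest m i hm).mpr hh)
      have hsel : selS (v :: t) (m.toNat / 2 ^ i) = selS t (m.toNat / 2 ^ (i + 1)) := by
        rw [selS, if_neg hbit, hdiv]
      rw [hsel, ih m (i + 1) seen chosen hm hs]

theorem check_eq (a : List Int) (m : Int) (hm : 0 ≤ m) :
    check a m =
      if (PySem.Set.ofList (selS a m.toNat)).length ≤ 2
      then checkTail (selS a m.toNat) else 0 := by
  unfold check
  have he : (PySem.Set.empty : PySem.Set Int).length ≤ 2 := by simp [PySem.Set.empty]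
  rw [checkSel_eq a m 0 PySem.Set.empty [] hm he]
  rw [pow_zero, Nat.div_one]
  have hu : PySem.Set.update (PySem.Set.empty : PySem.Set Int) (selS a m.toNat)
      = PySem.Set.ofList (selS a m.toNat) := PySem.Set.update_nil_left _
  rw [hu]
  by_cases hc : (PySem.Set.ofList (selS a m.toNat)).length ≤ 2
  · rw [if_pos hc, if_pos hc]
    simp
  · rw [if_neg hc, if_neg hc]

-- ---------- runLen / checkTail characterization ----------

theorem runLen_le (s : List Int) (c : Int) : runLen s c ≤ s.length := by
  induction s with
  | nil => simp [runLen]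
  | cons h t ih =>
    rw [runLen]
    split
    · simpa using ih
    · simp

theorem runLen_all (s : List Int) (c : Int) (h : ∀ v ∈ s, v = c) :
    runLen s c = s.length := by
  induction s with
  | nil => simp [runLen]
  | cons hd t ih =>
    rw [runLen, if_pos (h hd (List.mem_cons_self))]
    simp [ih (fun v hv => h v (List.mem_cons_of_mem _ hv))]

theorem runLen_replicate_append (x : Nat) (c : Int) (rest : List Int) :
    runLen (List.replicate x c ++ rest) c = x + runLen rest c := by
  induction x with
  | zero => simp
  | succ n ih =>
    rw [List.replicate_succ, List.cons_append, runLen, if_pos rfl, ih]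
    omega

theorem take_runLen (s : List Int) (c : Int) :
    s.take (runLen s c) = List.replicate (runLen s c) c := by
  induction s with
  | nil => simp [runLen]
  | cons h t ih =>
    rw [runLen]
    by_cases hh : h = c
    · rw [if_pos hh, List.take_succ_cons, List.replicate_succ, ih, hh]
    · rw [if_neg hh]
      simp

theorem head_drop_runLen (s : List Int) (c h : Int)
    (hh : (s.drop (runLen s c)).head? = some h) : h ≠ c := by
  induction s with
  | nil => simp [runLen] at hh
  | cons h0 t ih =>
    rw [runLen] at hh
    by_cases h0c : h0 = c
    · rw [if_pos h0c, List.drop_succ_cons] at hh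
      exact ih hh
    · rw [if_neg h0c, List.drop_zero, List.head?_cons] at hh
      rw [← Option.some_inj.mp hh]
      exact h0c

theorem checkTail_le_len (s : List Int) : checkTail s ≤ (s.length : Int) := by
  simp only [checkTail]
  split_ifs <;> omega

theorem checkTail_allEq (s : List Int) (c : Int) (h : ∀ v ∈ s, v = c) :
    checkTail s = (s.length : Int) := by
  cases s with
  | nil => rfl
  | cons a t =>
    have hall : ∀ v ∈ a :: t, v = a := by
      intro v hv
      rw [h v hv, h a (List.mem_cons_self)]
    simp only [checkTail, List.getD_cons_zero]
    rw [runLen_all _ _ hall, if_pos rfl]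

theorem checkTail_sandwich (c d : Int) (x y : Nat) (hcd : d ≠ c) (hx : 1 ≤ x) (hy : 1 ≤ y) :
    checkTail (List.replicate x c ++ List.replicate y d ++ List.replicate x c)
      = ((x + y + x : Nat) : Int) := by
  obtain ⟨x', rfl⟩ : ∃ x', x = x' + 1 := ⟨x - 1, by omega⟩
  obtain ⟨y', rfl⟩ : ∃ y', y = y' + 1 := ⟨y - 1, by omega⟩
  obtain ⟨s, hs0⟩ : ∃ s, s = List.replicate (x' + 1) c ++ List.replicate (y' + 1) d
      ++ List.replicate (x' + 1) c := ⟨_, rfl⟩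
  rw [← hs0]
  have hs : s = List.replicate (x' + 1) c ++
      (List.replicate (y' + 1) d ++ List.replicate (x' + 1) c) := by
    rw [hs0, List.append_assoc]
  have hc0 : s.getD 0 0 = c := by rw [hs, List.replicate_succ]; rfl
  have hmid : runLen (List.replicate (y' + 1) d ++ List.replicate (x' + 1) c) c = 0 := by
    rw [List.replicate_succ, List.cons_append, runLen, if_neg hcd]
  have hrl1 : runLen s c = x' + 1 := by
    rw [hs, runLen_replicate_append, hmid]
  have hlen : s.length = (x' + 1) + (y' + 1) + (x' + 1) := by
    rw [hs]; simp; omega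
  have hdrop : s.drop (x' + 1) = List.replicate (y' + 1) d ++ List.replicate (x' + 1) c := by
    rw [hs]
    have := List.drop_left (l₁ := List.replicate (x' + 1) c)
      (l₂ := List.replicate (y' + 1) d ++ List.replicate (x' + 1) c)
    rwa [List.length_replicate] at this
  have hd0 : (List.replicate (y' + 1) d ++ List.replicate (x' + 1) c).getD 0 0 = d := by
    rw [List.replicate_succ, List.cons_append, List.getD_cons_zero]
  have hrl2 : runLen (List.replicate (y' + 1) d ++ List.replicate (x' + 1) c) d = y' + 1 := by
    rw [runLen_replicate_append, List.replicate_succ, runLen, if_neg (Ne.symm hcd)]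
  have hdrop2 : (List.replicate (y' + 1) d ++ List.replicate (x' + 1) c).drop (y' + 1)
      = List.replicate (x' + 1) c := by
    have := List.drop_left (l₁ := List.replicate (y' + 1) d)
      (l₂ := List.replicate (x' + 1) c)
    rwa [List.length_replicate] at this
  simp only [checkTail]
  rw [hc0, hrl1, if_neg (by omega), hdrop, hd0, hrl2, if_neg (by omega),
    if_neg (by omega), hdrop2]
  rw [if_pos (by simp [List.all_eq_true, List.mem_replicate])]
  rw [hlen]

theorem checkTail_inv (s : List Int) (h : checkTail s ≠ 0) :
    checkTail s = (s.length : Int) ∧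
      ((∃ c, ∀ v ∈ s, v = c) ∨
       ∃ c d x y, 1 ≤ x ∧ 1 ≤ y ∧ d ≠ c ∧
         s = List.replicate x c ++ List.replicate y d ++ List.replicate x c) := by
  simp only [checkTail] at h ⊢
  by_cases h1 : runLen s (s.getD 0 0) = s.length
  · rw [if_pos h1] at h ⊢
    refine ⟨rfl, Or.inl ⟨s.getD 0 0, ?_⟩⟩
    intro v hv
    have hrep : s = List.replicate s.length (s.getD 0 0) := by
      calc s = s.take s.length := (List.take_length).symm
        _ = s.take (runLen s (s.getD 0 0)) := by rw [h1]
        _ = List.replicate (runLen s (s.getD 0 0)) (s.getD 0 0) := take_runLen s _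
        _ = List.replicate s.length (s.getD 0 0) := by rw [h1]
    rw [hrep] at hv
    exact (List.mem_replicate.mp hv).2
  · rw [if_neg h1] at h ⊢
    by_cases h2 : runLen s (s.getD 0 0) + runLen (s.drop (runLen s (s.getD 0 0)))
        ((s.drop (runLen s (s.getD 0 0))).getD 0 0) = s.length
    · rw [if_pos h2] at h; exact absurd rfl h
    · rw [if_neg h2] at h ⊢
      by_cases h3 : s.length = runLen s (s.getD 0 0) + runLen (s.drop (runLen s (s.getD 0 0)))
          ((s.drop (runLen s (s.getD 0 0))).getD 0 0) + runLen s (s.getD 0 0)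
      · rw [if_neg (not_not_intro h3)] at h ⊢
        by_cases h4 : ((s.drop (runLen s (s.getD 0 0))).drop
            (runLen (s.drop (runLen s (s.getD 0 0)))
              ((s.drop (runLen s (s.getD 0 0))).getD 0 0))).all
            (fun v => v == s.getD 0 0) = true
        · rw [if_pos h4] at h ⊢
          refine ⟨rfl, Or.inr ?_⟩
          have hxle : runLen s (s.getD 0 0) ≤ s.length := runLen_le s _
          have hxlt : runLen s (s.getD 0 0) < s.length := lt_of_le_of_ne hxle h1
          have hrestlen : (s.drop (runLen s (s.getD 0 0))).length
              = s.length - runLen s (s.getD 0 0) := by simp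
          obtain ⟨r0, rt, hrt⟩ : ∃ r0 rt, s.drop (runLen s (s.getD 0 0)) = r0 :: rt := by
            cases hc : s.drop (runLen s (s.getD 0 0)) with
            | nil =>
              rw [hc] at hrestlen
              simp only [List.length_nil] at hrestlen
              omega
            | cons a b => exact ⟨a, b, rfl⟩
          have hy1 : 1 ≤ runLen (s.drop (runLen s (s.getD 0 0)))
              ((s.drop (runLen s (s.getD 0 0))).getD 0 0) := by
            rw [hrt, List.getD_cons_zero, runLen, if_pos rfl]
            omega
          have hx1 : 1 ≤ runLen s (s.getD 0 0) := by
            by_contra hx0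
            have hx0' : runLen s (s.getD 0 0) = 0 := by omega
            rw [hx0'] at h2 h3
            omega
          have hdc : (s.drop (runLen s (s.getD 0 0))).getD 0 0 ≠ s.getD 0 0 := by
            apply head_drop_runLen s (s.getD 0 0)
            rw [hrt, List.getD_cons_zero, List.head?_cons]
          have hyle : runLen (s.drop (runLen s (s.getD 0 0)))
              ((s.drop (runLen s (s.getD 0 0))).getD 0 0)
              ≤ (s.drop (runLen s (s.getD 0 0))).length := runLen_le _ _
          refine ⟨s.getD 0 0, (s.drop (runLen s (s.getD 0 0))).getD 0 0,
            runLen s (s.getD 0 0), runLen (s.drop (runLen s (s.getD 0 0)))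
              ((s.drop (runLen s (s.getD 0 0))).getD 0 0), hx1, hy1, hdc, ?_⟩
          have e1 : s = s.take (runLen s (s.getD 0 0)) ++ s.drop (runLen s (s.getD 0 0)) :=
            (List.take_append_drop _ s).symm
          have e2 : s.take (runLen s (s.getD 0 0))
              = List.replicate (runLen s (s.getD 0 0)) (s.getD 0 0) := take_runLen s _
          have e3 : s.drop (runLen s (s.getD 0 0))
              = (s.drop (runLen s (s.getD 0 0))).take (runLen (s.drop (runLen s (s.getD 0 0)))
                  ((s.drop (runLen s (s.getD 0 0))).getD 0 0))
                ++ (s.drop (runLen s (s.getD 0 0))).drop (runLen (s.drop (runLen s (s.getD 0 0)))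
                  ((s.drop (runLen s (s.getD 0 0))).getD 0 0)) :=
            (List.take_append_drop _ _).symm
          have e4 : (s.drop (runLen s (s.getD 0 0))).take (runLen (s.drop (runLen s (s.getD 0 0)))
              ((s.drop (runLen s (s.getD 0 0))).getD 0 0))
              = List.replicate (runLen (s.drop (runLen s (s.getD 0 0)))
                  ((s.drop (runLen s (s.getD 0 0))).getD 0 0))
                ((s.drop (runLen s (s.getD 0 0))).getD 0 0) := take_runLen _ _
          have e5 : (s.drop (runLen s (s.getD 0 0))).drop (runLen (s.drop (runLen s (s.getD 0 0)))
              ((s.drop (runLen s (s.getD 0 0))).getD 0 0))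
              = List.replicate (runLen s (s.getD 0 0)) (s.getD 0 0) := by
            apply List.eq_replicate_iff.mpr
            refine ⟨?_, ?_⟩
            · simp only [List.length_drop]
              omega
            · intro b hb
              have := (List.all_eq_true.mp h4) b hb
              simpa using this
          conv_lhs => rw [e1, e3, e4, e5, e2]
          rw [List.append_assoc]
        · rw [if_neg h4] at h; exact absurd rfl h
      · rw [if_pos h3] at h; exact absurd rfl h

theorem ofList_length_le_two (s : List Int) (v w : Int) (h : ∀ e ∈ s, e = v ∨ e = w) :
    (PySem.Set.ofList s).length ≤ 2 := by
  have hnd := PySem.Set.nodup_ofList s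
  have hmem : ∀ e ∈ PySem.Set.ofList s, e = v ∨ e = w :=
    fun e he => h e ((PySem.Set.mem_ofList s e).mp he)
  by_contra hlen
  push_neg at hlen
  obtain ⟨a, b, c, t, hl⟩ : ∃ a b c t, PySem.Set.ofList s = a :: b :: c :: t := by
    cases hq : PySem.Set.ofList s with
    | nil => rw [hq] at hlen; simp at hlen
    | cons a l1 =>
      cases l1 with
      | nil => rw [hq] at hlen; simp at hlen
      | cons b l2 =>
        cases l2 with
        | nil => rw [hq] at hlen; simp at hlen
        | cons c2 l3 => exact ⟨a, b, c2, l3, rfl⟩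
  rw [hl] at hnd hmem
  have ha := hmem a (by simp)
  have hb := hmem b (by simp)
  have hc := hmem c (by simp)
  simp only [List.nodup_cons, List.mem_cons] at hnd
  rcases ha with rfl | rfl <;> rcases hb with rfl | rfl <;> rcases hc with rfl | rfl <;>
    simp_all

-- ---------- occ : occurrence positions ----------

def occ : List Int → Int → Int → List Int
  | [], _, _ => []
  | h :: t, v, i => if h = v then i :: occ t v (i + 1) else occ t v (i + 1)

theorem posOf_aux (v : Int) : ∀ (l : List Int) (i : Int) (acc : List Int),
    (PySem.List.enumerate l i).foldl (fun q iu => if iu.2 = v then q ++ [iu.1] else q) acc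
      = acc ++ occ l v i := by
  intro l
  induction l with
  | nil => intro i acc; simp [PySem.List.enumerate, occ]
  | cons h t ih =>
    intro i acc
    simp only [PySem.List.enumerate, List.foldl_cons]
    by_cases hh : h = v
    · rw [if_pos hh, ih, occ, if_pos hh]
      simp
    · rw [if_neg hh, ih, occ, if_neg hh]

theorem posOf_eq (a : List Int) (v : Int) : posOf a v = occ a v 0 := by
  rw [posOf, posOf_aux]
  simp

theorem occ_length : ∀ (l : List Int) (v : Int) (i : Int), (occ l v i).length = l.count v := by
  intro l
  induction l with
  | nil => intro v i; simp [occ]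
  | cons h t ih =>
    intro v i
    rw [occ]
    by_cases hh : h = v
    · rw [if_pos hh]
      simp [List.count_cons, hh, ih]
    · rw [if_neg hh]
      simp [List.count_cons, hh, ih]

theorem occ_get : ∀ (l : List Int) (v : Int) (i : Int) (k : Nat),
    k < l.count v →
    ∃ j : Nat, (occ l v i)[k]? = some (i + j) ∧ j < l.length ∧ l.getD j 0 = v ∧
      (l.take j).count v = k ∧ (l.drop (j + 1)).count v = l.count v - k - 1 := by
  intro l
  induction l with
  | nil => intro v i k hk; simp at hk
  | cons h t ih =>
    intro v i k hk
    rw [occ]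
    by_cases hh : h = v
    · rw [if_pos hh]
      cases k with
      | zero =>
        refine ⟨0, by simp, by simp, by simpa using hh, by simp, ?_⟩
        simp [List.count_cons, hh]
      | succ k' =>
        have hcnt : (h :: t).count v = t.count v + 1 := by simp [List.count_cons, hh]
        obtain ⟨j, hj1, hj2, hj3, hj4, hj5⟩ := ih v (i + 1) k' (by omega)
        refine ⟨j + 1, ?_, by simpa using hj2, by simpa using hj3, ?_, ?_⟩
        · rw [List.getElem?_cons_succ, hj1]
          congr 1
          push_cast
          ring
        · rw [List.take_succ_cons]
          simp [List.count_cons, hh, hj4]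
        · rw [List.drop_succ_cons, hj5, hcnt]
          omega
    · rw [if_neg hh]
      have hcnt : (h :: t).count v = t.count v := by simp [List.count_cons, hh]
      obtain ⟨j, hj1, hj2, hj3, hj4, hj5⟩ := ih v (i + 1) k (by omega)
      refine ⟨j + 1, ?_, by simpa using hj2, by simpa using hj3, ?_, ?_⟩
      · rw [hj1]
        congr 1
        push_cast
        ring
      · rw [List.take_succ_cons]
        simp [List.count_cons, hh, hj4]
      · rw [List.drop_succ_cons, hj5, hcnt]

theorem posOf_length (a : List Int) (v : Int) : (posOf a v).length = a.count v := by
  rw [posOf_eq, occ_length]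

-- ---------- vals / cntBetween ----------

theorem vals_eq (a : List Int) :
    a.foldl (fun vs v => if v ∈ vs then vs else vs ++ [v]) [] = PySem.Set.ofList a := by
  rw [PySem.Set.ofList_eq_foldl]
  apply PySem.List.foldl_congr_mem
  intro acc x _
  rw [PySem.Set.add_eq_ite]

theorem countP_enumerate (w : Int) : ∀ (t : List Int) (s l r : Int),
    (PySem.List.enumerate t s).countP (fun iu => decide (iu.2 = w ∧ l < iu.1 ∧ iu.1 < r))
      = ((t.take (r - s).toNat).drop ((l - s) + 1).toNat).count w := by
  intro t
  induction t with
  | nil => intro s l r; simp [PySem.List.enumerate]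
  | cons h t ih =>
    intro s l r
    simp only [PySem.List.enumerate, List.countP_cons]
    by_cases hr : s < r
    · have htake : ((h :: t).take (r - s).toNat) = h :: t.take (r - (s + 1)).toNat := by
        have he : (r - s).toNat = (r - (s + 1)).toNat + 1 := by omega
        rw [he, List.take_succ_cons]
      rw [htake]
      by_cases hl : l < s
      · have hd1 : ((l - s) + 1).toNat = 0 := by omega
        have hd2 : ((l - (s + 1)) + 1).toNat = 0 := by omega
        rw [hd1, List.drop_zero, ih (s + 1) l r, hd2, List.drop_zero]
        by_cases hw : h = w
        · simp [hw, hl, hr, List.count_cons]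
        · simp [hw, List.count_cons]
      · have he : ((l - s) + 1).toNat = ((l - (s + 1)) + 1).toNat + 1 := by omega
        rw [he, List.drop_succ_cons, ih (s + 1) l r]
        simp [hl]
    · have h0 : (r - s).toNat = 0 := by omega
      have h0' : (r - (s + 1)).toNat = 0 := by omega
      rw [h0, List.take_zero, ih (s + 1) l r, h0', List.take_zero]
      simp [hr]

theorem cnt_eq_count : ∀ (t : List Int) (w s l r : Int),
    (PySem.List.enumerate t s).foldl
      (fun c iu => if iu.2 = w ∧ l < iu.1 ∧ iu.1 < r then c + 1 else c) 0
    = (((t.take (r - s).toNat).drop ((l - s) + 1).toNat).count w : Int) := by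
  intro t w s l r
  have h : (PySem.List.enumerate t s).foldl
      (fun c iu => if iu.2 = w ∧ l < iu.1 ∧ iu.1 < r then c + 1 else c) 0
      = 0 + (((PySem.List.enumerate t s).countP
          (fun iu => decide (iu.2 = w ∧ l < iu.1 ∧ iu.1 < r))) : Int) :=
    PySem.List.foldl_ite_add_one _ _ _
  rw [h, countP_enumerate]
  simp

theorem cntBetween_eq (a : List Int) (w : Int) (jl jr : Nat) :
    cntBetween a w (jl : Int) (jr : Int)
      = (((a.take jr).drop (jl + 1)).count w : Int) := by
  unfold cntBetween
  rw [cnt_eq_count a w 0 jl jr]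
  have h1 : ((jr : Int) - 0).toNat = jr := by omega
  have h2 : (((jl : Int) - 0) + 1).toNat = jl + 1 := by omega
  rw [h1, h2]

-- ---------- position pair data ----------

theorem count_take_le_count_take (a : List Int) (v : Int) (i j : Nat) (h : i ≤ j) :
    (a.take i).count v ≤ (a.take j).count v := by
  have he : a.take i = (a.take j).take i := by rw [List.take_take, min_eq_left h]
  rw [he]
  exact (List.take_sublist _ _).count_le v

theorem pos_pair (a : List Int) (v : Int) (x : Nat) (hx : 1 ≤ x) (hx2 : 2 * x ≤ a.count v) :
    ∃ jl jr : Nat, jl < jr ∧ jr < a.length ∧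
      PySem.List.pyGetD (posOf a v) ((x : Int) - 1) 0 = (jl : Int) ∧
      PySem.List.pyGetD (posOf a v) (((posOf a v).length : Int) - (x : Int)) 0 = (jr : Int) ∧
      a.getD jl 0 = v ∧ a.getD jr 0 = v ∧
      (a.take (jl + 1)).count v = x ∧ (a.drop jr).count v = x ∧
      a = a.take (jl + 1) ++ ((a.take jr).drop (jl + 1) ++ a.drop jr) := by
  have hk1 : x - 1 < a.count v := by omega
  have hk2 : a.count v - x < a.count v := by omega
  obtain ⟨jl, hl1, hl2, hl3, hl4, hl5⟩ := occ_get a v 0 (x - 1) hk1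
  obtain ⟨jr, hr1, hr2, hr3, hr4, hr5⟩ := occ_get a v 0 (a.count v - x) hk2
  simp only [zero_add] at hl1 hr1
  have hgl : a[jl] = v := by rw [← List.getD_eq_getElem a 0 hl2]; exact hl3
  have hgr : a[jr] = v := by rw [← List.getD_eq_getElem a 0 hr2]; exact hr3
  have htl : (a.take (jl + 1)).count v = x := by
    rw [List.take_succ, List.getElem?_eq_getElem hl2]
    simp [List.count_append, hl4, hgl]
    omega
  have hdr : (a.drop jr).count v = x := by
    rw [List.drop_eq_getElem_cons hr2]
    simp [List.count_cons, hgr, hr5]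
    omega
  have hjlr : jl < jr := by
    by_contra hge
    have hmono : (a.take jr).count v ≤ (a.take jl).count v :=
      count_take_le_count_take a v jr jl (by omega)
    rw [hl4, hr4] at hmono
    omega
  have hpl : PySem.List.pyGetD (posOf a v) ((x : Int) - 1) 0 = (jl : Int) := by
    have hxc : ((x : Int) - 1) = ((x - 1 : Nat) : Int) := by omega
    rw [hxc, PySem.List.pyGetD_natCast, List.getD_eq_getElem?_getD, posOf_eq, hl1]
    rfl
  have hpr : PySem.List.pyGetD (posOf a v) (((posOf a v).length : Int) - (x : Int)) 0
      = (jr : Int) := by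
    have hxc : (((posOf a v).length : Int) - (x : Int)) = ((a.count v - x : Nat) : Int) := by
      rw [posOf_length]
      omega
    rw [hxc, PySem.List.pyGetD_natCast, List.getD_eq_getElem?_getD, posOf_eq, hr1]
    rfl
  refine ⟨jl, jr, hjlr, hr2, hpl, hpr, hl3, hr3, htl, hdr, ?_⟩
  have h1 : a.take jr = a.take (jl + 1) ++ (a.take jr).drop (jl + 1) := by
    conv_lhs => rw [← List.take_append_drop (jl + 1) (a.take jr)]
    rw [List.take_take, min_eq_left (by omega)]
  have h2 : a = (a.take (jl + 1) ++ (a.take jr).drop (jl + 1)) ++ a.drop jr := by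
    rw [← h1, List.take_append_drop]
  conv_lhs => rw [h2]
  rw [List.append_assoc]

-- the boundary argument: any c^x d^y c^x sublist keeps its middle block strictly between
-- the x-th occurrence of c from either end
theorem middle_count_ge (a : List Int) (c d : Int) (x y : Nat)
    (hsub : (List.replicate x c ++ List.replicate y d ++ List.replicate x c).Sublist a)
    (jl jr : Nat) (hjl : (a.take (jl + 1)).count c = x) (hjr : (a.drop jr).count c = x)
    (hgl : a.getD jl 0 = c) (hgr : a.getD jr 0 = c)
    (hjll : jl < a.length) (hjrl : jr < a.length) (hlr : jl < jr) :
    y ≤ ((a.take jr).drop (jl + 1)).count d := by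
  rw [List.append_assoc] at hsub
  obtain ⟨A1, R, hA, h1, hR⟩ := List.append_sublist_iff.mp hsub
  obtain ⟨A2, A3, hA2, h2, h3⟩ := List.append_sublist_iff.mp hR
  subst hA2
  have c1 : x ≤ A1.count c := List.replicate_sublist_iff.mp h1
  have c2 : y ≤ A2.count d := List.replicate_sublist_iff.mp h2
  have c3 : x ≤ A3.count c := List.replicate_sublist_iff.mp h3
  have hlenA : a.length = A1.length + (A2.length + A3.length) := by
    rw [hA]; simp
  have hb1 : jl + 1 ≤ A1.length := by
    by_contra hb
    have hA1le : A1.length ≤ jl := by omega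
    have hsplit : a.take (jl + 1) = A1 ++ (A2 ++ A3).take (jl + 1 - A1.length) := by
      rw [hA, List.take_append, List.take_of_length_le (by omega)]
    have hja : a[jl]? = some c := by
      rw [List.getElem?_eq_getElem hjll, ← List.getD_eq_getElem a 0 hjll, hgl]
    have hja2 : (A2 ++ A3)[jl - A1.length]? = some c := by
      rw [hA, List.getElem?_append_right hA1le] at hja
      exact hja
    have hval : ((A2 ++ A3).take (jl + 1 - A1.length))[jl - A1.length]? = some c := by
      rw [List.getElem?_take_of_lt (by omega)]
      exact hja2
    have hmem : c ∈ (A2 ++ A3).take (jl + 1 - A1.length) := List.mem_of_getElem? hval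
    have hpos : 0 < ((A2 ++ A3).take (jl + 1 - A1.length)).count c :=
      List.count_pos_iff.mpr hmem
    rw [hsplit, List.count_append] at hjl
    omega
  have hb2 : A1.length + A2.length ≤ jr := by
    by_contra hb
    have hjr12 : jr < A1.length + A2.length := by omega
    have hA' : a = (A1 ++ A2) ++ A3 := by rw [hA, List.append_assoc]
    have hsplit : a.drop jr = (A1 ++ A2).drop jr ++ A3 := by
      rw [hA', List.drop_append]
      have h0 : jr - (A1 ++ A2).length = 0 := by rw [List.length_append]; omega
      rw [h0, List.drop_zero]
    have hja : a[jr]? = some c := by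
      rw [List.getElem?_eq_getElem hjrl, ← List.getD_eq_getElem a 0 hjrl, hgr]
    have hja2 : (A1 ++ A2)[jr]? = some c := by
      rw [hA', List.getElem?_append_left (by rw [List.length_append]; omega)] at hja
      exact hja
    have hval : ((A1 ++ A2).drop jr)[0]? = some c := by
      rw [List.getElem?_drop]
      simpa using hja2
    have hmem : c ∈ (A1 ++ A2).drop jr := List.mem_of_getElem? hval
    have hpos : 0 < ((A1 ++ A2).drop jr).count c := List.count_pos_iff.mpr hmem
    rw [hsplit, List.count_append] at hjr
    omega
  have hseg : (a.take jr).drop (jl + 1)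
      = A1.drop (jl + 1) ++ (A2 ++ A3.take (jr - A1.length - A2.length)) := by
    have ht1 : a.take jr = A1 ++ (A2 ++ A3.take (jr - A1.length - A2.length)) := by
      rw [hA, List.take_append, List.take_of_length_le (by omega), List.take_append,
        List.take_of_length_le (by omega)]
    rw [ht1, List.drop_append]
    have h0 : jl + 1 - A1.length = 0 := by omega
    rw [h0, List.drop_zero]
  rw [hseg, List.count_append, List.count_append]
  omega

-- ---------- the two directions ----------

def innerStep (a vals p : List Int) : Int → Int → Int := fun best x =>
  let l := PySem.List.pyGetD p (x - 1) 0
  let r := PySem.List.pyGetD p ((p.length : Int) - x) 0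
  let inner := bestInner vals a l r
  let cand := 2 * x + inner
  if cand > best then cand else best

def stepB (a vals : List Int) : Int → Int → Int := fun best v =>
  (PySem.List.pyRange 1 (PySem.Int.floordiv ((posOf a v).length : Int) 2 + 1) 1).foldl
    (innerStep a vals (posOf a v))
    (if ((posOf a v).length : Int) > best then ((posOf a v).length : Int) else best)

theorem solve_alt_eq (a : List Int) :
    solve_alt a = (PySem.Set.ofList a).foldl (stepB a (PySem.Set.ofList a)) 0 := by
  simp only [solve_alt]
  rw [vals_eq]
  rfl

theorem innerStep_ge (a vals p : List Int) : ∀ (b x : Int), b ≤ innerStep a vals p b x := by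
  intro b x
  simp only [innerStep]
  split <;> omega

theorem stepB_ge (a vals : List Int) : ∀ (b v : Int), b ≤ stepB a vals b v := by
  intro b v
  simp only [stepB]
  refine le_trans (show b ≤ (if ((posOf a v).length : Int) > b then ((posOf a v).length : Int)
    else b) from by split <;> omega) (foldl_ge_init _ (innerStep_ge a vals _) _ _)

theorem solve_alt_nonneg (a : List Int) : 0 ≤ solve_alt a := by
  rw [solve_alt_eq]
  exact foldl_ge_init _ (stepB_ge a _) _ 0

theorem count_le_solve_alt (a : List Int) (v : Int) :
    (a.count v : Int) ≤ solve_alt a := by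
  by_cases hv : v ∈ a
  · rw [solve_alt_eq]
    refine foldl_reaches _ v _ (stepB_ge a _) ?_ _ 0 ((PySem.Set.mem_ofList a v).mpr hv)
    intro b
    simp only [stepB]
    refine le_trans ?_ (foldl_ge_init _ (innerStep_ge a _ _) _ _)
    rw [posOf_length]
    split <;> omega
  · rw [List.count_eq_zero.mpr hv]
    simpa using solve_alt_nonneg a

theorem sandwich_le_solve_alt (a : List Int) (c d : Int) (x y : Nat)
    (hcd : d ≠ c) (hx : 1 ≤ x) (hy : 1 ≤ y)
    (hsub : (List.replicate x c ++ List.replicate y d ++ List.replicate x c).Sublist a) :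
    ((x + y + x : Nat) : Int) ≤ solve_alt a := by
  have hcc := hsub.count_le c
  have hcd' := hsub.count_le d
  have hc1 : (List.replicate x c ++ List.replicate y d ++ List.replicate x c).count c
      = 2 * x := by
    simp [List.count_append, List.count_replicate, hcd]
    omega
  have hc2 : (List.replicate x c ++ List.replicate y d ++ List.replicate x c).count d = y := by
    have hne : c ≠ d := Ne.symm hcd
    simp [List.count_append, List.count_replicate, hne]
  rw [hc1] at hcc
  rw [hc2] at hcd'
  have hc : c ∈ a := List.count_pos_iff.mp (by omega)
  have hd : d ∈ a := List.count_pos_iff.mp (by omega)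
  obtain ⟨jl, jr, hjlr, hjrlen, hpl, hpr, hgl, hgr, htl, hdr, hadecomp⟩ :=
    pos_pair a c x hx (by omega)
  have hmid := middle_count_ge a c d x y hsub jl jr htl hdr hgl hgr (by omega) hjrlen hjlr
  rw [solve_alt_eq]
  refine foldl_reaches _ c _ (stepB_ge a _) ?_ _ 0 ((PySem.Set.mem_ofList a c).mpr hc)
  intro b
  simp only [stepB]
  refine foldl_reaches _ ((x : Nat) : Int) _ (innerStep_ge a _ _) ?_ _ _ ?_
  · intro cc
    simp only [innerStep]
    rw [hpl, hpr]
    have hbi : (y : Int) ≤ bestInner (PySem.Set.ofList a) a (jl : Int) (jr : Int) := by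
      unfold bestInner
      refine foldl_reaches _ d _ ?_ ?_ _ 0 ((PySem.Set.mem_ofList a d).mpr hd)
      · intro c2 w
        dsimp only
        split <;> omega
      · intro c2
        dsimp only
        rw [cntBetween_eq]
        split <;> omega
    push_cast
    split <;> omega
  · rw [posOf_length]
    have hfd : PySem.Int.floordiv ((a.count c : Nat) : Int) 2 = ((a.count c / 2 : Nat) : Int) :=
      by exact_mod_cast PySem.Int.floordiv_natCast (a.count c) 2
    rw [hfd, PySem.List.mem_pyRange_one]
    constructor
    · exact_mod_cast hx
    · omega

def plainFold (a : List Int) : Int :=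
  (PySem.List.pyRange (((2 : Nat) ^ a.length : Nat) : Int) (-1) (-1)).foldl
    (fun b i => max b (check a i)) 0

theorem mem_countdown (b m : Int) (hb : 0 ≤ b) :
    m ∈ PySem.List.pyRange b (-1) (-1) ↔ 0 ≤ m ∧ m ≤ b := by
  rw [PySem.List.pyRange_neg_one]
  simp only [List.mem_map, List.mem_range]
  constructor
  · rintro ⟨k, hk, rfl⟩
    omega
  · rintro ⟨h0, h1⟩
    exact ⟨(b - m).toNat, by omega, by omega⟩

theorem check_le_bin (a : List Int) (m : Int) (hm : 0 ≤ m) : check a m ≤ binSliceLen m := by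
  rw [check_eq a m hm, binSliceLen_eq m hm]
  split
  · calc checkTail (selS a m.toNat) ≤ ((selS a m.toNat).length : Int) := checkTail_le_len _
      _ ≤ (binDigits m.toNat : Int) := by exact_mod_cast selS_length_le a m.toNat
  · exact Int.natCast_nonneg _

theorem solve_eq_plain (a : List Int) : solve a = plainFold a := by
  simp only [solve, plainFold]
  have hbit : ((1 : Int) <<< a.length) = (((2 : Nat) ^ a.length : Nat) : Int) := by
    rw [Int.shiftLeft_eq, one_mul]
    push_cast
    ring
  rw [hbit]
  exact foldl_prune_eq (check a) binSliceLen _ 0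
    (fun i hi => check_le_bin a i ((mem_countdown _ i (by positivity)).mp hi).1)

theorem plain_nonneg (a : List Int) : 0 ≤ plainFold a := by
  unfold plainFold
  exact (le_foldl_maxf (check a) _ 0).1

theorem check_le_plain (a : List Int) (m : Nat) (hm : m ≤ 2 ^ a.length) :
    check a (m : Int) ≤ plainFold a := by
  unfold plainFold
  refine (le_foldl_maxf (check a) _ 0).2 ((m : Int)) ?_
  rw [mem_countdown _ _ (by positivity)]
  refine ⟨by positivity, ?_⟩
  exact_mod_cast hm

theorem count_le_plain (a : List Int) (v : Int) : (a.count v : Int) ≤ plainFold a := by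
  have hsub : (List.replicate (a.count v) v).Sublist a := List.replicate_sublist_iff.mpr le_rfl
  obtain ⟨mo, hmo, hsel⟩ := mask_exists _ a hsub
  have hce : check a (mo : Int) = (a.count v : Int) := by
    rw [check_eq a _ (by positivity)]
    simp only [Int.toNat_natCast]
    rw [hsel]
    rw [if_pos (ofList_length_le_two _ v v (fun e he => Or.inl (List.mem_replicate.mp he).2))]
    rw [checkTail_allEq _ v (fun e he => (List.mem_replicate.mp he).2)]
    simp
  rw [← hce]
  exact check_le_plain a mo (le_of_lt hmo)

theorem sandwich_le_plain (a : List Int) (c d : Int) (x y : Nat)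
    (hcd : d ≠ c) (hx : 1 ≤ x) (hy : 1 ≤ y)
    (hsub : (List.replicate x c ++ List.replicate y d ++ List.replicate x c).Sublist a) :
    ((x + y + x : Nat) : Int) ≤ plainFold a := by
  obtain ⟨mo, hmo, hsel⟩ := mask_exists _ a hsub
  have hall : ∀ e ∈ (List.replicate x c ++ List.replicate y d ++ List.replicate x c : List Int),
      e = c ∨ e = d := by
    intro e he
    simp [List.mem_append, List.mem_replicate] at he
    tauto
  have hce : check a (mo : Int) = ((x + y + x : Nat) : Int) := by
    rw [check_eq a _ (by positivity)]
    simp only [Int.toNat_natCast]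
    rw [hsel, if_pos (ofList_length_le_two _ c d hall), checkTail_sandwich c d x y hcd hx hy]
  rw [← hce]
  exact check_le_plain a mo (le_of_lt hmo)

theorem solve_le_solve_alt (a : List Int) : solve a ≤ solve_alt a := by
  rw [solve_eq_plain]
  unfold plainFold
  refine foldl_le_of_step _ (solve_alt a) _ 0 ?_ (solve_alt_nonneg a)
  intro b i hi hb
  refine max_le hb ?_
  have h0 : 0 ≤ i := ((mem_countdown _ i (by positivity)).mp hi).1
  rw [check_eq a i h0]
  split_ifs with hdis
  · by_cases hz : checkTail (selS a i.toNat) = 0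
    · rw [hz]
      exact solve_alt_nonneg a
    · obtain ⟨hval, hcase⟩ := checkTail_inv _ hz
      rw [hval]
      rcases hcase with ⟨c, hall⟩ | ⟨c, d, x, y, hx, hy, hdc, hshape⟩
      · have hsub := selS_sublist a i.toNat
        have hrep : selS a i.toNat = List.replicate (selS a i.toNat).length c :=
          List.eq_replicate_iff.mpr ⟨rfl, hall⟩
        have hcl : (selS a i.toNat).count c = (selS a i.toNat).length := by
          conv_lhs => rw [hrep]
          simp [List.count_replicate]
        have hle := hsub.count_le c
        have h2 := count_le_solve_alt a c
        omega
      · have hsub := selS_sublist a i.toNat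
        rw [hshape] at hsub
        have hL : (List.replicate x c ++ List.replicate y d ++ List.replicate x c).length
            = x + y + x := by
          simp
          omega
        rw [hshape, hL]
        exact sandwich_le_solve_alt a c d x y hdc hx hy hsub
  · exact solve_alt_nonneg a

theorem solve_alt_le_solve (a : List Int) : solve_alt a ≤ solve a := by
  rw [solve_eq_plain, solve_alt_eq]
  refine foldl_le_of_step _ (plainFold a) _ 0 ?_ (plain_nonneg a)
  intro b v hv hb
  simp only [stepB]
  refine foldl_le_of_step _ (plainFold a) _ _ ?_ ?_
  swap
  · rw [posOf_length]
    have := count_le_plain a v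
    split <;> omega
  intro c xi hxi hc
  simp only [innerStep]
  rw [posOf_length] at hxi
  have hfd : PySem.Int.floordiv ((a.count v : Nat) : Int) 2 = ((a.count v / 2 : Nat) : Int) :=
    by exact_mod_cast PySem.Int.floordiv_natCast (a.count v) 2
  rw [hfd, PySem.List.mem_pyRange_one] at hxi
  obtain ⟨hx1, hx2⟩ := hxi
  obtain ⟨xN, rfl⟩ : ∃ xN : Nat, xi = (xN : Int) := ⟨xi.toNat, by omega⟩
  have hxN1 : 1 ≤ xN := by exact_mod_cast hx1
  have hxN2 : 2 * xN ≤ a.count v := by omega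
  obtain ⟨jl, jr, hjlr, hjrlen, hpl, hpr, hgl, hgr, htl, hdr, hadecomp⟩ :=
    pos_pair a v xN hxN1 hxN2
  rw [hpl, hpr]
  have hbi_eq : bestInner (PySem.Set.ofList a) a (jl : Int) (jr : Int)
      = (PySem.Set.ofList a).foldl
          (fun c2 w => max c2 (cntBetween a w (jl : Int) (jr : Int))) 0 := by
    unfold bestInner
    apply PySem.List.foldl_congr_mem
    intro acc w _
    dsimp only
    rw [max_def]
    split_ifs <;> omega
  rw [hbi_eq]
  rcases foldl_max_eq_or_mem (fun w => cntBetween a w (jl : Int) (jr : Int))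
      (PySem.Set.ofList a) 0 with hz | ⟨w, hw, hwe⟩
  · rw [hz]
    have := count_le_plain a v
    split <;> omega
  · rw [hwe, cntBetween_eq]
    by_cases hw0 : ((a.take jr).drop (jl + 1)).count w = 0
    · rw [hw0]
      have := count_le_plain a v
      split <;> omega
    · by_cases hwv : w = v
      · subst hwv
        have hcnt_decomp : a.count w = xN + (((a.take jr).drop (jl + 1)).count w + xN) := by
          conv_lhs => rw [hadecomp]
          rw [List.count_append, List.count_append, htl, hdr]
        have := count_le_plain a w
        split <;> omega
      · have hsub2 : ((List.replicate xN v
              ++ List.replicate (((a.take jr).drop (jl + 1)).count w) w)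
            ++ List.replicate xN v).Sublist a := by
          rw [List.append_assoc]
          conv_rhs => rw [hadecomp]
          exact List.Sublist.append (List.replicate_sublist_iff.mpr (le_of_eq htl.symm))
            (List.Sublist.append (List.replicate_sublist_iff.mpr le_rfl)
              (List.replicate_sublist_iff.mpr (le_of_eq hdr.symm)))
        have hS := sandwich_le_plain a v w xN (((a.take jr).drop (jl + 1)).count w)
          hwv hxN1 (by omega) hsub2
        push_cast at hS ⊢
        split <;> omega

-- ===== VERDICT (by name: the statement is the Claim_ definition above) =====
theorem solve_spec : Claim_equal_solve := by
  intro a _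
  unfold Spec_solve
  exact le_antisymm (solve_le_solve_alt a) (solve_alt_le_solve a)
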